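-- pv_equiv track=rewrite | github.com/StianTang/S-AES | key.py | to_binary_4
-- ===== SOURCE A (Python) =====
-- def to_binary_4(x):
--     y = ""
--     while 1:
--         y = str(int(x) % 2) + y
--         x = int(x) // 2
--         if x == 0:
--             y = str("{:04d}".format(int(y)))
--             break
--     return y
-- ===== SOURCE B (Python) =====
-- def to_binary_4(x):
--     return format(int(x), '04b')
-- ===== Notes on version B (the rewrite author's own statement) =====
-- stated objective: idiomatic
-- what changed: B replaces A's manual mod/floor-divide digit-extraction loop plus decimal reparse-and-reformat ('{:04d}'.format(int(y))) with Python's built-in zero-padded binary formatting format(int(x), '04b').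
-- outside the precondition, e.g. on to_binary_4(-1): A does not finish within the time limit, B returns '-001'
import Mathlib
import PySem

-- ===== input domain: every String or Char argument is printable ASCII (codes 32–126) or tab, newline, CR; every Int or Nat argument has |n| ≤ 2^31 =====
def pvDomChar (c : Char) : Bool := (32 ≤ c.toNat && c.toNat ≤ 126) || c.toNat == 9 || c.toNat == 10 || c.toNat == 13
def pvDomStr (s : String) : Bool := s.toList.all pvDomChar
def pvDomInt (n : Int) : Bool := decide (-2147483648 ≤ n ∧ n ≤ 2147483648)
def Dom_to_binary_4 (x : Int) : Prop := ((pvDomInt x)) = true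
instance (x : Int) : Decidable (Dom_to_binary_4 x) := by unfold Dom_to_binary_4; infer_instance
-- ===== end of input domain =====

-- B replaces A's manual mod/floor-divide digit loop plus decimal reparse-and-reformat with the
-- built-in zero-padded binary formatting format(int(x), '04b'); equal on all x ≥ 0 (A never returns on x < 0).

-- ===== PORT A =====
-- int(y), hand-ported: PySem.Int.ofChars? is the general int(s), but every y this program parses
-- is a nonempty string of decimal digits (each prepended chunk is str(x % 2)), and on exactly those
-- strings this fold computes int(y); exact there.
def pvIntOfDigits (cs : List Char) : Int :=
  ((cs.foldl (fun a c => 10 * a + (c.toNat - 48)) 0 : Nat) : Int)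

-- the while-loop; fuel |x| + 1 is enough for every x ≥ 0, and on x < 0 Python's loop never returns
def toBinary4Loop : Nat → Int → List Char → List Char
  | 0, _, _ => []   -- fuel exhausted: unreachable under Pre_ (A diverges on x < 0)
  | fuel + 1, x, y =>
    let y' := PySem.Int.toChars (PySem.Int.mod x 2) ++ y     -- y = str(int(x) % 2) + y
    let x' := PySem.Int.floordiv x 2                          -- x = int(x) // 2
    if x' = 0 then PySem.Chars.zfill (PySem.Int.toChars (pvIntOfDigits y')) 4   -- "{:04d}".format(int(y))
    else toBinary4Loop fuel x' y'

def to_binary_4 (x : Int) : String :=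
  String.ofList (toBinary4Loop (x.natAbs + 1) x [])

-- ===== PORT B =====
def to_binary_4_alt (x : Int) : String :=
  String.ofList (PySem.Chars.zfill (PySem.Int.toBinChars x) 4)   -- format(int(x), '04b')

-- ===== PRECONDITION & SPEC =====
-- Pre_ excludes x < 0: there A's loop (x //= 2 with floor division) never reaches 0, so A never returns.
def Pre_to_binary_4 (x : Int) : Prop := 0 ≤ x
instance (x : Int) : Decidable (Pre_to_binary_4 x) := by unfold Pre_to_binary_4; infer_instance
def pvWitness_to_binary_4 : Int := (37)
def Spec_to_binary_4 (x : Int) (out : String) : Prop := out = to_binary_4_alt x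
instance (x : Int) (out : String) : Decidable (Spec_to_binary_4 x out) := by unfold Spec_to_binary_4; infer_instance

-- ===== CLAIM (what is proved, stated in full; the proofs are below) =====
def Claim_equal_to_binary_4 : Prop := ∀ (x : Int), Dom_to_binary_4 x → Pre_to_binary_4 x → Spec_to_binary_4 x (to_binary_4 x)

-- ===== LEMMAS AND PROOFS =====

-- small decidable facts about decimal digit characters
lemma pv_digitChar_toNat : ∀ d : Nat, d < 10 → (Nat.digitChar d).toNat = 48 + d := by decide
lemma pv_toDigits10_small : ∀ d : Nat, d < 10 → Nat.toDigits 10 d = [Nat.digitChar d] := by decide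

-- a fuel-free reformulation of Nat.toDigitsCore (proofs only; the ports never use it)
def pvDigs (b n : Nat) (ds : List Char) : List Char :=
  if _h : n < b ∨ b ≤ 1 then Nat.digitChar n :: ds
  else pvDigs b (n / b) (Nat.digitChar (n % b) :: ds)
termination_by n
decreasing_by
  exact Nat.div_lt_self (by omega) (by omega)

lemma pv_core_eq_digs (b : Nat) (hb : 2 ≤ b) :
    ∀ f n ds, n < f → Nat.toDigitsCore b f n ds = pvDigs b n ds := by
  intro f
  induction f with
  | zero => intro n ds h; omega
  | succ g ih =>
    intro n ds h
    simp only [Nat.toDigitsCore]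
    by_cases h0 : n / b = 0
    · have hnb : n < b := (Nat.div_eq_zero_iff_lt (by omega)).mp h0
      rw [pvDigs]
      simp [h0, hnb, Nat.mod_eq_of_lt hnb]
    · have hnb' : ¬ n < b := fun hc => h0 ((Nat.div_eq_zero_iff_lt (by omega)).mpr hc)
      have hbn : b ≤ n := by omega
      rw [pvDigs]
      rw [dif_neg (by omega : ¬ (n < b ∨ b ≤ 1))]
      rw [if_neg h0]
      have hlt : n / b < n := Nat.div_lt_self (by omega) (by omega)
      exact ih (n / b) _ (by omega)

lemma pv_toDigits_eq_digs (b n : Nat) (hb : 2 ≤ b) : Nat.toDigits b n = pvDigs b n [] := by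
  simp only [Nat.toDigits]
  exact pv_core_eq_digs b hb (n + 1) n [] (by omega)

lemma pv_digs_append (b : Nat) (hb : 2 ≤ b) :
    ∀ n ds, pvDigs b n ds = pvDigs b n [] ++ ds := by
  intro n
  induction n using Nat.strong_induction_on with
  | _ n ih =>
    intro ds
    by_cases hc : n < b ∨ b ≤ 1
    · conv_lhs => rw [pvDigs]
      conv_rhs => rw [pvDigs]
      simp [hc]
    · have hbn : b ≤ n := by omega
      have hlt : n / b < n := Nat.div_lt_self (by omega) (by omega)
      conv_lhs => rw [pvDigs]
      conv_rhs => rw [pvDigs]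
      rw [dif_neg hc, dif_neg hc]
      rw [ih (n / b) hlt (Nat.digitChar (n % b) :: ds),
          ih (n / b) hlt [Nat.digitChar (n % b)]]
      simp

lemma pv_toDigits_step (b n : Nat) (hb : 2 ≤ b) (hn : b ≤ n) :
    Nat.toDigits b n = Nat.toDigits b (n / b) ++ [Nat.digitChar (n % b)] := by
  rw [pv_toDigits_eq_digs b n hb, pv_toDigits_eq_digs b (n / b) hb]
  rw [pvDigs]
  rw [dif_neg (by omega : ¬ (n < b ∨ b ≤ 1))]
  exact pv_digs_append b hb (n / b) [Nat.digitChar (n % b)]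

lemma pv_toDigits_small (b d : Nat) (hb : 2 ≤ b) (hd : d < b) :
    Nat.toDigits b d = [Nat.digitChar d] := by
  rw [pv_toDigits_eq_digs b d hb, pvDigs]
  simp [hd]

-- shape of a binary digit string: decimal-digit characters, leading '1'
lemma pv_bin_shape : ∀ n : Nat, 1 ≤ n →
    (∀ c ∈ Nat.toDigits 2 n, ∃ d, d < 10 ∧ c = Nat.digitChar d) ∧
    (Nat.toDigits 2 n).head? = some '1' := by
  intro n
  induction n using Nat.strong_induction_on with
  | _ n ih =>
    intro h1
    by_cases h2 : n < 2
    · have hn1 : n = 1 := by omega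
      subst hn1
      rw [pv_toDigits_small 2 1 (by omega) (by omega)]
      constructor
      · intro c hc
        simp at hc
        exact ⟨1, by omega, by subst hc; decide⟩
      · rfl
    · have hstep := pv_toDigits_step 2 n (by omega) (by omega)
      have hdiv : n / 2 < n := Nat.div_lt_self (by omega) (by omega)
      have h1' : 1 ≤ n / 2 := by omega
      obtain ⟨ihm, ihh⟩ := ih (n / 2) hdiv h1'
      constructor
      · intro c hc
        rw [hstep] at hc
        rcases List.mem_append.mp hc with hc | hc
        · exact ihm c hc
        · simp at hc
          exact ⟨n % 2, by omega, hc⟩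
      · rw [hstep]
        obtain ⟨c0, rest, hrest⟩ : ∃ c0 rest, Nat.toDigits 2 (n / 2) = c0 :: rest := by
          cases hd : Nat.toDigits 2 (n / 2) with
          | nil => rw [hd] at ihh; simp at ihh
          | cons a l => exact ⟨a, l, rfl⟩
        rw [hrest] at ihh ⊢
        simp at ihh
        simp [ihh]

-- the decimal-digit fold grows monotonically
lemma pv_foldl_mono : ∀ (cs : List Char) (a : Nat),
    a ≤ cs.foldl (fun a c => 10 * a + (c.toNat - 48)) a := by
  intro cs
  induction cs with
  | nil => intro a; simp
  | cons c rest ih =>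
    intro a
    simp only [List.foldl]
    have h1 : a ≤ 10 * a + (c.toNat - 48) := by omega
    exact le_trans h1 (ih _)

lemma pv_decVal_pos (cs : List Char) (c0 : Char) (hh : cs.head? = some c0)
    (hd : ∃ d, d < 10 ∧ c0 = Nat.digitChar d) (h0 : c0 ≠ '0') :
    1 ≤ cs.foldl (fun a c => 10 * a + (c.toNat - 48)) 0 := by
  obtain ⟨d, hd10, hdc⟩ := hd
  cases cs with
  | nil => simp at hh
  | cons c rest =>
    have hc : c = c0 := by simpa using hh
    simp only [List.foldl]
    have hne : d ≠ 0 := by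
      intro h; apply h0; rw [hdc, h]; rfl
    have hv : c.toNat = 48 + d := by rw [hc, hdc]; exact pv_digitChar_toNat d hd10
    have h1 : 1 ≤ 10 * 0 + (c.toNat - 48) := by omega
    exact le_trans h1 (pv_foldl_mono rest _)

-- decimal print/parse roundtrip on digit strings without a leading zero
lemma pv_roundtrip : ∀ cs : List Char,
    (∀ c ∈ cs, ∃ d, d < 10 ∧ c = Nat.digitChar d) →
    ∀ c0, cs.head? = some c0 → c0 ≠ '0' →
    Nat.toDigits 10 (cs.foldl (fun a c => 10 * a + (c.toNat - 48)) 0) = cs := by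
  intro cs
  induction cs using List.reverseRecOn with
  | nil => intro _ c0 hh; simp at hh
  | append_singleton cs' c ih =>
    intro hdig c0 hh h0
    obtain ⟨d, hd10, hdc⟩ := hdig c (by simp)
    have hcnat : c.toNat = 48 + d := by rw [hdc]; exact pv_digitChar_toNat d hd10
    by_cases hcs' : cs' = []
    · subst hcs'
      have hc : c = c0 := by simpa using hh
      have hdne : d ≠ 0 := by
        intro h
        apply h0
        rw [← hc, hdc, h]
        rfl
      simp only [List.nil_append, List.foldl]
      rw [show 10 * 0 + (c.toNat - 48) = d from by omega]
      rw [pv_toDigits10_small d hd10, ← hdc]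
    · obtain ⟨a, l, he⟩ := List.exists_cons_of_ne_nil hcs'
      subst he
      have hac : a = c0 := by simpa using hh
      have hdig' : ∀ x ∈ a :: l, ∃ d, d < 10 ∧ x = Nat.digitChar d :=
        fun x hx => hdig x (List.mem_append_left _ hx)
      have hih := ih hdig' c0 (by simp [hac]) h0
      have hv1 : 1 ≤ (a :: l).foldl (fun a c => 10 * a + (c.toNat - 48)) 0 :=
        pv_decVal_pos (a :: l) c0 (by simp [hac]) (hdig' c0 (by simp [hac])) h0
      rw [List.foldl_append]
      set v := (a :: l).foldl (fun a c => 10 * a + (c.toNat - 48)) 0 with hV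
      rw [show List.foldl (fun a c => 10 * a + (c.toNat - 48)) v [c] = 10 * v + d from by
        simp only [List.foldl]; omega]
      rw [pv_toDigits_step 10 (10 * v + d) (by omega) (by omega)]
      rw [show (10 * v + d) / 10 = v from by omega,
          show (10 * v + d) % 10 = d from by omega]
      rw [hih, ← hdc]

-- PySem casts specialised to a natural argument
lemma pv_toChars_natCast (m : Nat) : PySem.Int.toChars (m : Int) = Nat.toDigits 10 m := by
  simp [PySem.Int.toChars]
lemma pv_toBinChars_natCast (m : Nat) : PySem.Int.toBinChars (m : Int) = Nat.toDigits 2 m := by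
  simp [PySem.Int.toBinChars]
lemma pv_mod2 (n : Nat) : PySem.Int.mod (n : Int) 2 = ((n % 2 : Nat) : Int) := by
  exact_mod_cast PySem.Int.mod_natCast n 2
lemma pv_div2 (n : Nat) : PySem.Int.floordiv (n : Int) 2 = ((n / 2 : Nat) : Int) := by
  exact_mod_cast PySem.Int.floordiv_natCast n 2

-- the loop, on a positive natural input, formats the accumulated binary digit string
lemma pv_loop_eq : ∀ (f n : Nat) (acc : List Char), 1 ≤ n → n ≤ f →
    toBinary4Loop f ((n : Nat) : Int) acc
      = PySem.Chars.zfill (PySem.Int.toChars (pvIntOfDigits (Nat.toDigits 2 n ++ acc))) 4 := by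
  intro f
  induction f with
  | zero => intro n acc h1 h2; omega
  | succ g ih =>
    intro n acc h1 h2
    simp only [toBinary4Loop]
    rw [pv_mod2, pv_div2, pv_toChars_natCast,
        pv_toDigits10_small (n % 2) (by omega)]
    by_cases h0 : n / 2 = 0
    · have hn1 : n = 1 := by omega
      subst hn1
      norm_num [show Nat.toDigits 2 1 = ['1'] from by decide,
                show Nat.digitChar (1 % 2) = '1' from by decide]
    · have hcast : ¬ (((n / 2 : Nat) : Int) = 0) := by exact_mod_cast h0
      rw [if_neg hcast]
      have h1' : 1 ≤ n / 2 := by omega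
      have h2' : n / 2 ≤ g := by
        have : n / 2 < n := Nat.div_lt_self (by omega) (by omega)
        omega
      rw [List.singleton_append]
      rw [ih (n / 2) (Nat.digitChar (n % 2) :: acc) h1' h2']
      have hn2 : 2 ≤ n := by omega
      rw [pv_toDigits_step 2 n (by omega) hn2]
      simp

-- ===== VERDICT (by name: the statement is the Claim_ definition above) =====
theorem to_binary_4_spec : Claim_equal_to_binary_4 := by
  intro x _ hpre
  unfold Spec_to_binary_4
  obtain ⟨n, rfl⟩ : ∃ n : Nat, x = (n : Int) := ⟨x.toNat, (Int.toNat_of_nonneg hpre).symm⟩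
  by_cases h0 : n = 0
  · subst h0; decide
  · have h1 : 1 ≤ n := by omega
    unfold to_binary_4 to_binary_4_alt
    rw [show ((n : Int)).natAbs + 1 = n + 1 from by simp]
    rw [pv_loop_eq (n + 1) n [] h1 (by omega)]
    rw [List.append_nil]
    unfold pvIntOfDigits
    rw [pv_toChars_natCast, pv_toBinChars_natCast]
    obtain ⟨hdig, hhead⟩ := pv_bin_shape n h1
    rw [pv_roundtrip (Nat.toDigits 2 n) hdig '1' hhead (by decide)]
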